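-- pv_equiv track=rewrite | github.com/opendatalab/OmniDocBench | tools/model_infer/Ovis_img2md.py | clean_truncated_repeats
-- ===== SOURCE A (Python) =====
-- def clean_truncated_repeats(
--     text: str,
--     min_text_len: int = 8000,
--     max_period: int = 200,
--     min_period: int = 1,
--     min_repeat_chars: int = 100,
--     min_repeat_times: int = 5,
-- ) -> str:
--     n = len(text)
--     if n < min_text_len:
--         return text
--     max_period = min(max_period, n - 1)
--     for unit_len in range(min_period, max_period + 1):
--         if text[n - 1] != text[n - 1 - unit_len]:
--             continue
--         match_len = 1
--         idx = n - 2
--         while idx >= unit_len and text[idx] == text[idx - unit_len]: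
--             match_len += 1
--             idx -= 1
--         total_len = match_len + unit_len
--         repeat_times = total_len // unit_len
--         tail_len = total_len % unit_len
--         if repeat_times >= min_repeat_times and total_len >= min_repeat_chars:
--             return text[:n - total_len + unit_len] + text[n - tail_len:]
--     return text
-- ===== SOURCE B (Python) =====
-- def clean_truncated_repeats(
--     text: str,
--     min_text_len: int = 8000,
--     max_period: int = 200,
--     min_period: int = 1,
--     min_repeat_chars: int = 100,
--     min_repeat_times: int = 5,
-- ) -> str:
--     n = len(text)
--     if n < min_text_len:
--         return text
--     max_period = min(max_period, n - 1)
--     r = text[::-1]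
--     for p in range(min_period, max_period + 1):
--         suf = r[p:]
--         # longest m with r[:m] == suf[:m] (= longest periodic suffix of text minus p),
--         # found by binary search on the monotone predicate, comparing slices in C
--         hi = len(suf)
--         if r[:hi] == suf:
--             m = hi
--         else:
--             lo = 0
--             while hi - lo > 1:
--                 mid = (lo + hi) // 2
--                 if r[:mid] == suf[:mid]:
--                     lo = mid
--                 else:
--                     hi = mid
--             m = lo
--         if m == 0:
--             continue
--         total = m + p
--         if total // p >= min_repeat_times and total >= min_repeat_chars:
--             return text[:n - total + p] + text[n - total % p:]
--     return text
-- ===== Notes on version B (the rewrite author's own statement) =====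
-- stated objective: alternative
-- what changed: B reverses the text once and, for each candidate period p, finds the length of the periodic suffix by binary search over the monotone predicate that the length-m prefixes of the reversed text and of its shift by p agree, using whole-slice comparisons, instead of A's backward character-by-character index walk per period.
import Mathlib
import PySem

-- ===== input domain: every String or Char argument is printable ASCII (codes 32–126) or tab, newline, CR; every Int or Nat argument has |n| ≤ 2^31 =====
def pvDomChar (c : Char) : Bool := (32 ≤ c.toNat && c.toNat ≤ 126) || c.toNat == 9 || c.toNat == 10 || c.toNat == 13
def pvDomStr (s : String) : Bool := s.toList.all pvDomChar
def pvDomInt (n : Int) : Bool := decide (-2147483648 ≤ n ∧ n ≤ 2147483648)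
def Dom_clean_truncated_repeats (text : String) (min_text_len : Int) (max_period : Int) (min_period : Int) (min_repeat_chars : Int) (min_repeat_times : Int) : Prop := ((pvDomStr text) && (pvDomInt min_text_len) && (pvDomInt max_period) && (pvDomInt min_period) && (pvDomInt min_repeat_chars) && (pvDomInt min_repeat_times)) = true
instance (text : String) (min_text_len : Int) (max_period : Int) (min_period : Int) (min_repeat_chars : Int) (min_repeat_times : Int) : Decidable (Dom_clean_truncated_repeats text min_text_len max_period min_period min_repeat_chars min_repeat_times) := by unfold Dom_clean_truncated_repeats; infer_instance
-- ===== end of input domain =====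

-- B finds each period's periodic-suffix length by binary search with slice comparisons over the
-- reversed text instead of A's per-period backward character walk (objective: alternative algorithm).


-- ===== PORT A =====
-- the inner 'while idx >= unit_len and text[idx] == text[idx - unit_len]' loop
def pvA_while (s : List Char) (unit_len : Int) (idx : Int) (match_len : Int) : Int :=
  if h : unit_len ≤ idx ∧ PySem.List.pyGet? s idx = PySem.List.pyGet? s (idx - unit_len) then
    pvA_while s unit_len (idx - 1) (match_len + 1)
  else match_len
termination_by (idx - unit_len + 1).toNat
decreasing_by omega

-- one iteration of A's 'for unit_len in range(...)' body: some = Python's 'return', none = fall through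
def pvA_step (s : List Char) (min_repeat_chars : Int) (min_repeat_times : Int) (unit_len : Int) : Option (List Char) :=
  let n : Int := s.length
  if PySem.List.pyGet? s (n - 1) ≠ PySem.List.pyGet? s (n - 1 - unit_len) then none
  else
    let match_len := pvA_while s unit_len (n - 2) 1
    let total_len := match_len + unit_len
    let repeat_times := PySem.Int.floordiv total_len unit_len
    let tail_len := PySem.Int.mod total_len unit_len
    if min_repeat_times ≤ repeat_times ∧ min_repeat_chars ≤ total_len then
      some (PySem.List.slice s none (some (n - total_len + unit_len)) ++ PySem.List.slice s (some (n - tail_len)) none)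
    else none

def clean_truncated_repeats (text : String) (min_text_len : Int) (max_period : Int) (min_period : Int) (min_repeat_chars : Int) (min_repeat_times : Int) : String :=
  let s := text.toList
  let n : Int := s.length
  if n < min_text_len then text
  else
    let max_period := min max_period (n - 1)
    match (PySem.List.pyRange min_period (max_period + 1) 1).findSome? (pvA_step s min_repeat_chars min_repeat_times) with
    | some l => String.ofList l
    | none => text

-- ===== PORT B =====
-- binary search: largest m in (lo, hi) semantics of Source B's while-loop
def pvB_bsearch (r : List Char) (suf : List Char) (lo : Nat) (hi : Nat) : Nat :=
  if 1 < hi - lo then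
    let mid := (lo + hi) / 2
    if r.take mid = suf.take mid then pvB_bsearch r suf mid hi else pvB_bsearch r suf lo mid
  else lo
termination_by hi - lo
decreasing_by all_goals omega

-- longest m with r[:m] == suf[:m], as Source B computes it
def pvB_lcp (r : List Char) (suf : List Char) : Nat :=
  if r.take suf.length = suf then suf.length else pvB_bsearch r suf 0 suf.length

-- one iteration of Source B's loop body
def pvB_step (r : List Char) (s : List Char) (min_repeat_chars : Int) (min_repeat_times : Int) (p : Int) : Option (List Char) :=
  let n : Int := s.length
  let suf := PySem.List.slice r (some p) none
  let m := pvB_lcp r suf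
  if m = 0 then none
  else
    let total : Int := (m : Int) + p
    if min_repeat_times ≤ PySem.Int.floordiv total p ∧ min_repeat_chars ≤ total then
      some (PySem.List.slice s none (some (n - total + p)) ++ PySem.List.slice s (some (n - PySem.Int.mod total p)) none)
    else none

def clean_truncated_repeats_alt (text : String) (min_text_len : Int) (max_period : Int) (min_period : Int) (min_repeat_chars : Int) (min_repeat_times : Int) : String :=
  let s := text.toList
  let n : Int := s.length
  if n < min_text_len then text
  else
    let max_period := min max_period (n - 1)
    let r := (PySem.List.slice? s none none (-1)).getD []   -- text[::-1]
    match (PySem.List.pyRange min_period (max_period + 1) 1).findSome? (pvB_step r s min_repeat_chars min_repeat_times) with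
    | some l => String.ofList l
    | none => text

-- ===== PRECONDITION & SPEC =====
-- Pre_ excludes exactly the inputs on which A raises (ZeroDivisionError at unit_len = 0, or
-- IndexError at a negative unit_len): min_period < 1 while the period range is nonempty.
def Pre_clean_truncated_repeats (text : String) (min_text_len : Int) (max_period : Int) (min_period : Int) (min_repeat_chars : Int) (min_repeat_times : Int) : Prop :=
  (text.toList.length : Int) < min_text_len ∨ 1 ≤ min_period ∨ min max_period ((text.toList.length : Int) - 1) < min_period
instance (text : String) (min_text_len : Int) (max_period : Int) (min_period : Int) (min_repeat_chars : Int) (min_repeat_times : Int) : Decidable (Pre_clean_truncated_repeats text min_text_len max_period min_period min_repeat_chars min_repeat_times) := by unfold Pre_clean_truncated_repeats; infer_instance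

def pvWitness_clean_truncated_repeats : String × Int × Int × Int × Int × Int := ("abcabcabcabc", 5, 10, 1, 6, 3)

def Spec_clean_truncated_repeats (text : String) (min_text_len : Int) (max_period : Int) (min_period : Int) (min_repeat_chars : Int) (min_repeat_times : Int) (out : String) : Prop := out = clean_truncated_repeats_alt text min_text_len max_period min_period min_repeat_chars min_repeat_times
instance (text : String) (min_text_len : Int) (max_period : Int) (min_period : Int) (min_repeat_chars : Int) (min_repeat_times : Int) (out : String) : Decidable (Spec_clean_truncated_repeats text min_text_len max_period min_period min_repeat_chars min_repeat_times out) := by unfold Spec_clean_truncated_repeats; infer_instance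

-- ===== CLAIM (what is proved, stated in full; the proofs are below) =====
def Claim_equal_clean_truncated_repeats : Prop := ∀ (text : String) (min_text_len : Int) (max_period : Int) (min_period : Int) (min_repeat_chars : Int) (min_repeat_times : Int), Dom_clean_truncated_repeats text min_text_len max_period min_period min_repeat_chars min_repeat_times → Pre_clean_truncated_repeats text min_text_len max_period min_period min_repeat_chars min_repeat_times → Spec_clean_truncated_repeats text min_text_len max_period min_period min_repeat_chars min_repeat_times (clean_truncated_repeats text min_text_len max_period min_period min_repeat_chars min_repeat_times)

-- ===== LEMMAS AND PROOFS =====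

-- the reference value: length of the longest common prefix of two lists
def pvLcp : List Char → List Char → Nat
  | a :: as, b :: bs => if a = b then pvLcp as bs + 1 else 0
  | _, _ => 0

lemma pvLcp_nil_right (xs : List Char) : pvLcp xs [] = 0 := by cases xs <;> rfl

lemma pvLcp_le_right (xs ys : List Char) : pvLcp xs ys ≤ ys.length := by
  induction xs generalizing ys with
  | nil => cases ys <;> simp [pvLcp]
  | cons a as ih =>
    cases ys with
    | nil => simp [pvLcp]
    | cons b bs => by_cases h : a = b <;> simp [pvLcp, h] <;> exact ih bs

lemma pvTake_eq_iff (xs ys : List Char) (m : Nat) (hm : m ≤ ys.length) (hlen : ys.length ≤ xs.length) :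
    (xs.take m = ys.take m ↔ m ≤ pvLcp xs ys) := by
  induction m generalizing xs ys with
  | zero => simp
  | succ k ih =>
    cases ys with
    | nil => simp at hm
    | cons b bs =>
      cases xs with
      | nil => simp at hlen
      | cons a as =>
        simp only [List.take_succ_cons, List.cons.injEq, pvLcp]
        by_cases h : a = b
        · rw [if_pos h]
          constructor
          · rintro ⟨-, ht⟩
            have := (ih as bs (by simpa using hm) (by simpa using hlen)).mp ht
            omega
          · intro hk
            refine ⟨h, (ih as bs (by simpa using hm) (by simpa using hlen)).mpr (by omega)⟩
        · rw [if_neg h]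
          simp [h]

lemma pvB_bsearch_eq (r suf : List Char) (lo hi : Nat)
    (hlo : lo ≤ pvLcp r suf) (hhi : pvLcp r suf < hi) (hhi' : hi ≤ suf.length)
    (hlen : suf.length ≤ r.length) : pvB_bsearch r suf lo hi = pvLcp r suf := by
  rw [pvB_bsearch]
  by_cases hgap : 1 < hi - lo
  · rw [if_pos hgap]
    set mid := (lo + hi) / 2 with hmid
    by_cases htake : r.take mid = suf.take mid
    · rw [if_pos htake]
      have h1 : mid ≤ pvLcp r suf := by
        rw [← pvTake_eq_iff r suf mid (by omega) hlen]; exact htake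
      exact pvB_bsearch_eq r suf mid hi h1 hhi hhi' hlen
    · rw [if_neg htake]
      have h2 : ¬ mid ≤ pvLcp r suf := by
        rw [← pvTake_eq_iff r suf mid (by omega) hlen]; exact htake
      exact pvB_bsearch_eq r suf lo mid hlo (by omega) (by omega) hlen
  · rw [if_neg hgap]; omega
termination_by hi - lo
decreasing_by all_goals omega

lemma pvB_lcp_eq (r suf : List Char) (hlen : suf.length ≤ r.length) :
    pvB_lcp r suf = pvLcp r suf := by
  unfold pvB_lcp
  have hle := pvLcp_le_right r suf
  by_cases h : r.take suf.length = suf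
  · rw [if_pos h]
    have : r.take suf.length = suf.take suf.length := by simpa using h
    have := (pvTake_eq_iff r suf suf.length le_rfl hlen).mp this
    omega
  · rw [if_neg h]
    have h' : ¬ (suf.length ≤ pvLcp r suf) := by
      rw [← pvTake_eq_iff r suf suf.length le_rfl hlen]
      simpa using h
    exact pvB_bsearch_eq r suf 0 suf.length (by omega) (by omega) le_rfl hlen

-- one unfolding step of pvLcp on drops of the reversed list
lemma pvLcp_drop_step (r : List Char) (j p : Nat) (hj : j < r.length) (hjp : j + p < r.length) :
    pvLcp (r.drop j) (r.drop (j + p)) =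
      if r[j] = r[j + p] then pvLcp (r.drop (j + 1)) (r.drop (j + 1 + p)) + 1 else 0 := by
  rw [List.drop_eq_getElem_cons hj, List.drop_eq_getElem_cons hjp]
  have : j + p + 1 = j + 1 + p := by omega
  simp [pvLcp, this]

-- A's inner while-loop computes the common-prefix length of the reversed tails
lemma pvA_while_eq (s : List Char) (p j : Nat) (hp : 1 ≤ p) (hj : 1 ≤ j) (m : Int) :
    pvA_while s (p : Int) ((s.length : Int) - 1 - (j : Int)) m =
      m + ((pvLcp (s.reverse.drop j) (s.reverse.drop (j + p)) : Nat) : Int) := by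
  rw [pvA_while]
  by_cases hend : s.length ≤ j + p
  · have hcond : ¬ ((p : Int) ≤ (s.length : Int) - 1 - (j : Int) ∧
        PySem.List.pyGet? s ((s.length : Int) - 1 - (j : Int)) =
          PySem.List.pyGet? s ((s.length : Int) - 1 - (j : Int) - (p : Int))) := by
      rintro ⟨h1, -⟩; omega
    rw [dif_neg hcond]
    have : s.reverse.drop (j + p) = [] := by
      apply List.drop_eq_nil_of_le; simpa using hend
    rw [this, pvLcp_nil_right]; simp
  · push_neg at hend
    have hjlt : j < s.length := by omega
    have hrl : s.reverse.length = s.length := by simp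
    have hg1 : PySem.List.pyGet? s ((s.length : Int) - 1 - (j : Int)) =
        some (s.reverse[j]'(by simpa using hjlt)) := by
      have he : (s.length : Int) - 1 - (j : Int) = ((s.length - 1 - j : Nat) : Int) := by omega
      rw [he, PySem.List.pyGet?_natCast, List.getElem?_eq_getElem (by omega)]
      exact congrArg some (by rw [List.getElem_reverse])
    have hg2 : PySem.List.pyGet? s ((s.length : Int) - 1 - (j : Int) - (p : Int)) =
        some (s.reverse[j + p]'(by simpa using hend)) := by
      have he : (s.length : Int) - 1 - (j : Int) - (p : Int) = ((s.length - 1 - (j + p) : Nat) : Int) := by omega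
      rw [he, PySem.List.pyGet?_natCast, List.getElem?_eq_getElem (by omega)]
      exact congrArg some (by rw [List.getElem_reverse])
    by_cases hch : s.reverse[j] = s.reverse[j + p]
    · have hcond : ((p : Int) ≤ (s.length : Int) - 1 - (j : Int) ∧
          PySem.List.pyGet? s ((s.length : Int) - 1 - (j : Int)) =
            PySem.List.pyGet? s ((s.length : Int) - 1 - (j : Int) - (p : Int))) := by
        constructor
        · omega
        · rw [hg1, hg2, hch]
      rw [dif_pos hcond]
      have he2 : (s.length : Int) - 1 - (j : Int) - 1 = (s.length : Int) - 1 - ((j + 1 : Nat) : Int) := by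
        push_cast; ring
      rw [he2, pvA_while_eq s p (j + 1) hp (by omega) (m + 1)]
      rw [pvLcp_drop_step s.reverse j p (by omega) (by omega), if_pos hch]
      push_cast; ring
    · have hcond : ¬ ((p : Int) ≤ (s.length : Int) - 1 - (j : Int) ∧
          PySem.List.pyGet? s ((s.length : Int) - 1 - (j : Int)) =
            PySem.List.pyGet? s ((s.length : Int) - 1 - (j : Int) - (p : Int))) := by
        rintro ⟨-, h2⟩
        rw [hg1, hg2] at h2
        exact hch (Option.some.inj h2)
      rw [dif_neg hcond]
      rw [pvLcp_drop_step s.reverse j p (by omega) (by omega), if_neg hch]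
      simp
termination_by s.length - j
decreasing_by omega

-- the two loop bodies agree for every admissible period 1 ≤ p ≤ n - 1
lemma pv_step_eq (s : List Char) (mrc mrt : Int) (p : Nat) (hp : 1 ≤ p) (hpn : p ≤ s.length - 1) :
    pvA_step s mrc mrt (p : Int) = pvB_step s.reverse s mrc mrt (p : Int) := by
  have hn2 : 2 ≤ s.length := by omega
  have hrl : s.reverse.length = s.length := by simp
  -- B's suffix and match length
  have hsuf : PySem.List.slice s.reverse (some (p : Int)) none = s.reverse.drop p :=
    PySem.List.slice_from_natCast s.reverse p
  have hm : pvB_lcp s.reverse (s.reverse.drop p) = pvLcp s.reverse (s.reverse.drop p) := by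
    apply pvB_lcp_eq; simp
  -- A's two head reads
  have hg1 : PySem.List.pyGet? s ((s.length : Int) - 1) =
      some (s.reverse[0]'(by simpa using (by omega : 0 < s.length))) := by
    have he : (s.length : Int) - 1 = ((s.length - 1 - 0 : Nat) : Int) := by omega
    rw [he, PySem.List.pyGet?_natCast, List.getElem?_eq_getElem (by omega)]
    exact congrArg some (by rw [List.getElem_reverse])
  have hg2 : PySem.List.pyGet? s ((s.length : Int) - 1 - (p : Int)) =
      some (s.reverse[p]'(by simpa using (by omega : p < s.length))) := by
    have he : (s.length : Int) - 1 - (p : Int) = ((s.length - 1 - p : Nat) : Int) := by omega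
    rw [he, PySem.List.pyGet?_natCast, List.getElem?_eq_getElem (by omega)]
    exact congrArg some (by rw [List.getElem_reverse])
  have hstep0 := pvLcp_drop_step s.reverse 0 p (by omega) (by omega)
  simp only [List.drop_zero, Nat.zero_add] at hstep0
  unfold pvA_step pvB_step
  by_cases hch : s.reverse[0]'(by omega) = s.reverse[p]'(by omega)
  · -- heads match: A computes the full match, B's lcp is one more than on the tails
    have hstep0pos : pvLcp s.reverse (s.reverse.drop p) =
        pvLcp (s.reverse.drop 1) (s.reverse.drop (1 + p)) + 1 := by
      rw [hstep0, if_pos hch]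
    have hA : pvA_while s (p : Int) ((s.length : Int) - 2) 1 =
        1 + ((pvLcp (s.reverse.drop 1) (s.reverse.drop (1 + p)) : Nat) : Int) := by
      have he : (s.length : Int) - 2 = (s.length : Int) - 1 - ((1 : Nat) : Int) := by push_cast; ring
      rw [he]; exact pvA_while_eq s p 1 hp le_rfl 1
    have hcast : ((pvLcp (s.reverse.drop 1) (s.reverse.drop (1 + p)) + 1 : Nat) : Int) =
        1 + ((pvLcp (s.reverse.drop 1) (s.reverse.drop (1 + p)) : Nat) : Int) := by push_cast; ring
    simp only [hsuf, hm, hg1, hg2, hstep0pos, hA, hch, hcast, ne_eq, not_true_eq_false,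
      if_false, Nat.succ_ne_zero, Nat.add_one_ne_zero]
  · -- heads differ: A falls through, B's lcp is 0
    have hstep0neg : pvLcp s.reverse (s.reverse.drop p) = 0 := by rw [hstep0, if_neg hch]
    simp only [hsuf, hm, hg1, hg2, hstep0neg, ne_eq, Option.some.injEq, hch,
      not_false_eq_true, if_true]

-- findSome? respects pointwise-equal functions on the list's members
lemma pvFindSome?_congr {α β : Type} (l : List α) (f g : α → Option β)
    (h : ∀ x ∈ l, f x = g x) : l.findSome? f = l.findSome? g := by
  induction l with
  | nil => rfl
  | cons a as ih =>
    simp only [List.findSome?_cons]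
    rw [h a (by simp)]
    cases g a with
    | some b => rfl
    | none => exact ih (fun x hx => h x (by simp [hx]))

-- ===== VERDICT (by name: the statement is the Claim_ definition above) =====
theorem clean_truncated_repeats_spec : Claim_equal_clean_truncated_repeats := by
  intro text mtl maxp minp mrc mrt _hdom hpre
  unfold Spec_clean_truncated_repeats clean_truncated_repeats clean_truncated_repeats_alt
  show (if ((text.toList.length : Int)) < mtl then text else
      match (PySem.List.pyRange minp (min maxp ((text.toList.length : Int) - 1) + 1) 1).findSome?
          (pvA_step text.toList mrc mrt) with
      | some l => String.ofList l
      | none => text) =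
    (if ((text.toList.length : Int)) < mtl then text else
      match (PySem.List.pyRange minp (min maxp ((text.toList.length : Int) - 1) + 1) 1).findSome?
          (pvB_step ((PySem.List.slice? text.toList none none (-1)).getD []) text.toList mrc mrt) with
      | some l => String.ofList l
      | none => text)
  set s := text.toList with hs
  by_cases hlt : (s.length : Int) < mtl
  · rw [if_pos hlt, if_pos hlt]
  · rw [if_neg hlt, if_neg hlt]
    have hr : (PySem.List.slice? s none none (-1)).getD [] = s.reverse := by
      rw [PySem.List.slice?_none_none_neg_one]; rfl
    rw [hr]
    rcases hpre with h1 | h2 | h3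
    · exact absurd h1 hlt
    · -- min_period ≥ 1: the two loop bodies agree on every element of the range
      have key : (PySem.List.pyRange minp (min maxp ((s.length : Int) - 1) + 1) 1).findSome?
          (pvA_step s mrc mrt) =
          (PySem.List.pyRange minp (min maxp ((s.length : Int) - 1) + 1) 1).findSome?
          (pvB_step s.reverse s mrc mrt) := by
        apply pvFindSome?_congr
        intro x hx
        rw [PySem.List.mem_pyRange_one] at hx
        have hx1 : 1 ≤ x := le_trans h2 hx.1
        have hmin : min maxp ((s.length : Int) - 1) ≤ (s.length : Int) - 1 := min_le_right _ _
        have hx2 : x ≤ (s.length : Int) - 1 := by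
          have h2x := hx.2; omega
        obtain ⟨q, rfl⟩ := Int.eq_ofNat_of_zero_le (by omega : (0 : Int) ≤ x)
        exact pv_step_eq s mrc mrt q (by exact_mod_cast hx1) (by omega)
      rw [key]
    · -- empty range: both loops do nothing
      have h3' : min maxp ((s.length : Int) - 1) < minp := by simpa [hs] using h3
      have hnil : PySem.List.pyRange minp (min maxp ((s.length : Int) - 1) + 1) 1 = [] :=
        PySem.List.pyRange_one_eq_nil (by omega)
      rw [hnil]
      rfl
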